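-- pv_equiv track=rewrite | github.com/ahsan1o/AntiTrapLens | antitraplens/detector/rules.py | detect_data_collection
-- ===== SOURCE A (Python) =====
-- from typing import List, Dict, Any
--
-- def detect_data_collection(page_data: Dict[str, Any]) -> List[Dict[str, Any]]:
--     findings = []
--     js_scripts = page_data.get('js_scripts', [])
--     if any('analytics' in js.lower() or 'tracking' in js.lower() for js in js_scripts):
--         findings.append({
--             'pattern': 'data_collection',
--             'severity': 'low',
--             'description': "Potential extensive data collection via tracking scripts.",
--             'evidence': f"JS scripts: {[js for js in js_scripts if 'analytics' in js.lower()]}"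
--         })
--     return findings
-- ===== SOURCE B (Python) =====
-- def detect_data_collection(page_data):
--     findings = []
--     triggered = False
--     evidence = []
--     for js in page_data.get('js_scripts', []):
--         low = js.lower()
--         if 'analytics' in low:
--             triggered = True
--             evidence.append(js)
--         elif 'tracking' in low:
--             triggered = True
--     if triggered:
--         findings.append({
--             'pattern': 'data_collection',
--             'severity': 'low',
--             'description': "Potential extensive data collection via tracking scripts.",
--             'evidence': f"JS scripts: {evidence}"
--         })
--     return findings
-- ===== Notes on version B (the rewrite author's own statement) =====
-- stated objective: simpler
-- what changed: One single pass over js_scripts with a triggered flag and an evidence accumulator (each script lowercased once) replaces A's two separate traversals (an any() scan plus a filtering comprehension).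
import Mathlib
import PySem

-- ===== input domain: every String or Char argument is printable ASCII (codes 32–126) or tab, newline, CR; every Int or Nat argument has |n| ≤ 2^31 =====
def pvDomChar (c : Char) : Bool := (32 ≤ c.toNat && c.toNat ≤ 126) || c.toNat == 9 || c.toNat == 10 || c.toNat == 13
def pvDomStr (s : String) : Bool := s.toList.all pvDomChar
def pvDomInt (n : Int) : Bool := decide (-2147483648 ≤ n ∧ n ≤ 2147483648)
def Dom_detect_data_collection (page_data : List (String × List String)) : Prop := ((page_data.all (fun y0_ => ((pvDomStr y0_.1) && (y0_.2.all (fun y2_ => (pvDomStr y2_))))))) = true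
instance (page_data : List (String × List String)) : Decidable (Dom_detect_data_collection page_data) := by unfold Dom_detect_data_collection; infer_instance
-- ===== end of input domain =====

-- B replaces A's two traversals (any() scan + filtering comprehension) by one single pass
-- keeping a triggered flag and an evidence accumulator; objective: simpler, same asymptotics.

-- shared formatting helper: Python repr of one string on the printable-ASCII(+tab/nl/cr) domain
-- (exact there: quote is ' unless the string has ' and no ", escapes for \, the quote, \t, \n, \r)
def pyReprStrChars (cs : List Char) : List Char :=
  let q : Char := if cs.contains '\'' && !cs.contains '"' then '"' else '\''
  q :: (cs.flatMap (fun c =>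
      if c = '\\' then ['\\', '\\']
      else if c = q then ['\\', q]
      else if c = '\t' then ['\\', 't']
      else if c = '\n' then ['\\', 'n']
      else if c = '\r' then ['\\', 'r']
      else [c])) ++ [q]

-- shared formatting helper: Python str() of a list of strings (repr of each, ", "-separated, in brackets)
def pyReprStrList (xs : List String) : String :=
  String.ofList ('[' :: (List.intercalate [',', ' '] (xs.map (fun s => pyReprStrChars s.toList))) ++ [']'])

def pvFinding (evidence : String) : List (String × String) :=
  [("pattern", "data_collection"),
   ("severity", "low"),
   ("description", "Potential extensive data collection via tracking scripts."),
   ("evidence", String.ofList ("JS scripts: ".toList ++ evidence.toList))]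

-- ===== PORT A =====
def detect_data_collection (page_data : List (String × List String)) : List (List (String × String)) :=
  let findings : List (List (String × String)) := []
  let js_scripts := PySem.Dict.getD (PySem.Dict.mk page_data) "js_scripts" []
  if js_scripts.any (fun js =>
      PySem.Str.isIn "analytics" (PySem.Str.lower js) || PySem.Str.isIn "tracking" (PySem.Str.lower js)) then
    findings ++ [pvFinding (pyReprStrList (js_scripts.filter (fun js => PySem.Str.isIn "analytics" (PySem.Str.lower js))))]
  else findings

-- ===== PORT B =====
def detect_data_collection_alt (page_data : List (String × List String)) : List (List (String × String)) :=
  let findings : List (List (String × String)) := []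
  let st := (PySem.Dict.getD (PySem.Dict.mk page_data) "js_scripts" []).foldl
    (fun (acc : Bool × List String) js =>
      let low := PySem.Str.lower js
      if PySem.Str.isIn "analytics" low then (true, acc.2 ++ [js])
      else if PySem.Str.isIn "tracking" low then (true, acc.2)
      else acc)
    (false, [])
  if st.1 then findings ++ [pvFinding (pyReprStrList st.2)] else findings

-- ===== PRECONDITION & SPEC =====
def Spec_detect_data_collection (page_data : List (String × List String)) (out : List (List (String × String))) : Prop := out = detect_data_collection_alt page_data
instance (page_data : List (String × List String)) (out : List (List (String × String))) : Decidable (Spec_detect_data_collection page_data out) := by unfold Spec_detect_data_collection; infer_instance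

-- ===== CLAIM (what is proved, stated in full; the proofs are below) =====
def Claim_equal_detect_data_collection : Prop := ∀ (page_data : List (String × List String)), Dom_detect_data_collection page_data → Spec_detect_data_collection page_data (detect_data_collection page_data)

-- ===== LEMMAS AND PROOFS =====

theorem pvFold_eq (l : List String) (acc : Bool × List String) :
    l.foldl (fun (acc : Bool × List String) js =>
        let low := PySem.Str.lower js
        if PySem.Str.isIn "analytics" low then (true, acc.2 ++ [js])
        else if PySem.Str.isIn "tracking" low then (true, acc.2)
        else acc) acc
    = (acc.1 || l.any (fun js =>
          PySem.Str.isIn "analytics" (PySem.Str.lower js) || PySem.Str.isIn "tracking" (PySem.Str.lower js)),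
       acc.2 ++ l.filter (fun js => PySem.Str.isIn "analytics" (PySem.Str.lower js))) := by
  induction l generalizing acc with
  | nil => simp
  | cons x xs ih =>
    simp only [List.foldl_cons, List.any_cons, List.filter_cons]
    rw [ih]
    by_cases ha : PySem.Chars.isIn ['a','n','a','l','y','t','i','c','s'] (PySem.Chars.lower x.toList) = true
    · simp [ha]
    · by_cases ht : PySem.Chars.isIn ['t','r','a','c','k','i','n','g'] (PySem.Chars.lower x.toList) = true
      · simp [ha, ht]
      · simp [ha, ht]

-- ===== VERDICT (by name: the statement is the Claim_ definition above) =====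
theorem detect_data_collection_spec : Claim_equal_detect_data_collection := by
  intro page_data _
  unfold Spec_detect_data_collection detect_data_collection detect_data_collection_alt
  rw [pvFold_eq]
  simp
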